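-- pv_equiv track=rewrite | github.com/not-a-bank/open-banking-tracker-data | scrapers/gocardless_scraper.py | find_matching_provider
-- ===== SOURCE A (Python) =====
-- from typing import Optional
--
-- def find_matching_provider(bank_id: str, existing_ids: set[str]) -> Optional[str]:
--     """
--     Find an existing provider ID that matches the given bank ID.
--
--     Args:
--         bank_id: The slugified bank ID
--         existing_ids: Set of existing provider IDs
--
--     Returns:
--         The matching existing provider ID, or None if no match
--     """
--     # Exact match
--     if bank_id in existing_ids:
--         return bank_id
--
--     # Common suffixes to try removing/adding
--     suffixes = ['-bank', '-financial', '-credit-union', '-savings', '-trust', '-plc', '-limited', '-ltd', '-group', '-ag', '-sa', '-nv']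
--     country_suffixes = ['-gb', '-de', '-fr', '-nl', '-es', '-it', '-ie', '-be', '-at', '-se', '-dk', '-no', '-fi', '-pl', '-pt']
--
--     # Try removing country suffixes first
--     for suffix in country_suffixes:
--         if bank_id.endswith(suffix):
--             base_id = bank_id[:-len(suffix)]
--             if base_id in existing_ids:
--                 return base_id
--
--     # Try removing common suffixes
--     for suffix in suffixes:
--         if bank_id.endswith(suffix):
--             base_id = bank_id[:-len(suffix)]
--             if base_id in existing_ids:
--                 return base_id
--
--     # Try adding suffixes
--     for suffix in suffixes:
--         if f"{bank_id}{suffix}" in existing_ids: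
--             return f"{bank_id}{suffix}"
--
--     # Try common name variations
--     variations = [
--         bank_id.replace('-and-', '-'),
--         bank_id.replace('-', ''),
--         bank_id.replace('bank-of-', ''),
--         bank_id.replace('-bank', ''),
--     ]
--     for var in variations:
--         if var in existing_ids:
--             return var
--
--     return None
-- ===== SOURCE B (Python) =====
-- from typing import Optional
--
-- _SUFFIXES = ['-bank', '-financial', '-credit-union', '-savings', '-trust', '-plc',
--              '-limited', '-ltd', '-group', '-ag', '-sa', '-nv']
-- _COUNTRY_SUFFIXES = ['-gb', '-de', '-fr', '-nl', '-es', '-it', '-ie', '-be', '-at',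
--                      '-se', '-dk', '-no', '-fi', '-pl', '-pt']
--
-- def _candidates(bank_id: str) -> list:
--     """All candidate IDs in priority order (may contain duplicates)."""
--     cands = [bank_id]
--     for s in _COUNTRY_SUFFIXES:
--         if bank_id.endswith(s):
--             cands.append(bank_id[:-len(s)])
--     for s in _SUFFIXES:
--         if bank_id.endswith(s):
--             cands.append(bank_id[:-len(s)])
--     for s in _SUFFIXES:
--         cands.append(bank_id + s)
--     cands.append(bank_id.replace('-and-', '-'))
--     cands.append(bank_id.replace('-', ''))
--     cands.append(bank_id.replace('bank-of-', ''))
--     cands.append(bank_id.replace('-bank', ''))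
--     return cands
--
-- def find_matching_provider(bank_id: str, existing_ids: set) -> Optional[str]:
--     # Invert the search: index candidates by priority, then scan the existing
--     # ids once, keeping the existing id with the lowest candidate rank.
--     rank = {}
--     for i, c in enumerate(_candidates(bank_id)):
--         if c not in rank:
--             rank[c] = i
--     best = None
--     for pid in existing_ids:
--         r = rank.get(pid)
--         if r is not None and (best is None or r < best[0]):
--             best = (r, pid)
--     return best[1] if best is not None else None
-- ===== Notes on version B (the rewrite author's own statement) =====
-- stated objective: alternative
-- what changed: A probes each candidate string against the set in five staged loops with early returns; B inverts the search: it builds a hash index mapping every candidate to its priority rank once, then makes a single pass over existing_ids keeping the id with the lowest rank (a min-accumulator scan over the set instead of membership probes over the candidates).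
import Mathlib
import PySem

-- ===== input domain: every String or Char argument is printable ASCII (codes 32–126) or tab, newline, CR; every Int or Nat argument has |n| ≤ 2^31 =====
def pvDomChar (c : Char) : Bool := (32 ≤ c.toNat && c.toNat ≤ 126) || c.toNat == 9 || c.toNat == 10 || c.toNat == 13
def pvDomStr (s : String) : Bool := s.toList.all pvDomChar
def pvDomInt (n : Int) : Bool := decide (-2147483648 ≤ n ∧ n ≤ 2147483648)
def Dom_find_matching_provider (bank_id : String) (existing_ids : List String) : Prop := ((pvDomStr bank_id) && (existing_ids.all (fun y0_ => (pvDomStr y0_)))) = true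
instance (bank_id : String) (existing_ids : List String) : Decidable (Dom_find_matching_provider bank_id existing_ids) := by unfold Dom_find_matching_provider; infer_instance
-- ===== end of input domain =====

-- B inverts A's search: it indexes all candidates by priority rank in a dict and scans existing_ids once keeping the lowest-ranked hit (objective: alternative).


-- shared module constants (the two suffix lists from the Python module)
def pvSuffixes : List String :=
  ["-bank", "-financial", "-credit-union", "-savings", "-trust", "-plc",
   "-limited", "-ltd", "-group", "-ag", "-sa", "-nv"]
def pvCountrySuffixes : List String :=
  ["-gb", "-de", "-fr", "-nl", "-es", "-it", "-ie", "-be", "-at",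
   "-se", "-dk", "-no", "-fi", "-pl", "-pt"]

-- bank_id[:-len(suffix)]  (exact: PySem.Str.slice is Python's slice on code points)
def pvStrip (bank_id suffix : String) : String :=
  PySem.Str.slice bank_id none (some (-(PySem.Str.len suffix : Int)))

-- ===== PORT A =====
-- A's five stages in order, each loop ported as List.findSome? (first iteration that returns)
def find_matching_provider (bank_id : String) (existing_ids : List String) : Option String :=
  if existing_ids.contains bank_id then some bank_id
  else
    match pvCountrySuffixes.findSome? (fun suffix =>
        if PySem.Str.endswith bank_id suffix then
          let base_id := pvStrip bank_id suffix
          if existing_ids.contains base_id then some base_id else none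
        else none) with
    | some r => some r
    | none =>
      match pvSuffixes.findSome? (fun suffix =>
          if PySem.Str.endswith bank_id suffix then
            let base_id := pvStrip bank_id suffix
            if existing_ids.contains base_id then some base_id else none
          else none) with
      | some r => some r
      | none =>
        match pvSuffixes.findSome? (fun suffix =>
            if existing_ids.contains (bank_id ++ suffix) then some (bank_id ++ suffix) else none) with
        | some r => some r
        | none =>
          match ([PySem.Str.replace bank_id "-and-" "-",
                  PySem.Str.replace bank_id "-" "",
                  PySem.Str.replace bank_id "bank-of-" "",
                  PySem.Str.replace bank_id "-bank" ""]).findSome? (fun var =>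
              if existing_ids.contains var then some var else none) with
          | some r => some r
          | none => none

-- ===== PORT B =====
-- Source B's _candidates: the candidate ids in priority order (may contain duplicates)
def pvCandidates (bank_id : String) : List String :=
  bank_id ::
    (pvCountrySuffixes.filterMap (fun suffix =>
        if PySem.Str.endswith bank_id suffix then some (pvStrip bank_id suffix) else none)
     ++ pvSuffixes.filterMap (fun suffix =>
        if PySem.Str.endswith bank_id suffix then some (pvStrip bank_id suffix) else none)
     ++ pvSuffixes.map (fun suffix => bank_id ++ suffix)
     ++ [PySem.Str.replace bank_id "-and-" "-",
         PySem.Str.replace bank_id "-" "",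
         PySem.Str.replace bank_id "bank-of-" "",
         PySem.Str.replace bank_id "-bank" ""])

-- Source B's rank dict: candidate -> index of its first occurrence (enumerate + insert-if-absent)
def pvRank (bank_id : String) : PySem.Dict String Int :=
  (PySem.List.enumerate (pvCandidates bank_id) 0).foldl
    (fun d p => if d.contains p.2 then d else d.insert p.2 p.1) PySem.Dict.empty

-- Source B's single scan over existing_ids keeping the lowest-ranked hit
def find_matching_provider_alt (bank_id : String) (existing_ids : List String) : Option String :=
  let rank := pvRank bank_id
  let best := existing_ids.foldl (fun best pid =>
      match rank.get? pid with
      | none => best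
      | some r =>
        match best with
        | none => some (r, pid)
        | some b => if r < b.1 then some (r, pid) else some b) none
  best.map (·.2)

-- ===== PRECONDITION & SPEC =====
def Spec_find_matching_provider (bank_id : String) (existing_ids : List String) (out : Option String) : Prop := out = find_matching_provider_alt bank_id existing_ids
instance (bank_id : String) (existing_ids : List String) (out : Option String) : Decidable (Spec_find_matching_provider bank_id existing_ids out) := by unfold Spec_find_matching_provider; infer_instance

-- ===== CLAIM (what is proved, stated in full; the proofs are below) =====
def Claim_equal_find_matching_provider : Prop := ∀ (bank_id : String) (existing_ids : List String), Dom_find_matching_provider bank_id existing_ids → Spec_find_matching_provider bank_id existing_ids (find_matching_provider bank_id existing_ids)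

-- ===== LEMMAS AND PROOFS =====

-- ---- A equals the first candidate present in existing_ids ----

-- find? over a guarded filterMap is the findSome? of A's guarded loop body
theorem pv_find?_filterMap_if {a b : Type} (p : b → Bool) (g : a → Bool) (h : a → b) (xs : List a) :
    (xs.filterMap (fun x => if g x then some (h x) else none)).find? p
      = xs.findSome? (fun x => if g x then (if p (h x) then some (h x) else none) else none) := by
  induction xs with
  | nil => rfl
  | cons y ys ih =>
    by_cases hg : g y = true
    · by_cases hp : p (h y) = true <;> simp [hg, hp, ih]
    · simp [hg, ih]

-- find? over a map is the findSome? of A's add-suffix loop body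
theorem pv_find?_map_if {a b : Type} (p : b → Bool) (f : a → b) (xs : List a) :
    (xs.map f).find? p = xs.findSome? (fun x => if p (f x) then some (f x) else none) := by
  induction xs with
  | nil => rfl
  | cons y ys ih => by_cases hp : p (f y) = true <;> simp [hp, ih]

-- find? is the findSome? of A's variations loop body
theorem pv_find?_eq_findSome? {a : Type} (p : a → Bool) (xs : List a) :
    xs.find? p = xs.findSome? (fun x => if p x then some x else none) := by
  induction xs with
  | nil => rfl
  | cons y ys ih => by_cases hp : p y = true <;> simp [hp, ih]

theorem pvA_eq_find? (bank_id : String) (existing_ids : List String) :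
    find_matching_provider bank_id existing_ids
      = (pvCandidates bank_id).find? (fun c => existing_ids.contains c) := by
  unfold find_matching_provider pvCandidates
  by_cases h0 : existing_ids.contains bank_id = true
  · rw [if_pos h0, List.find?_cons_of_pos h0]
  · rw [if_neg h0, List.find?_cons_of_neg h0,
      List.find?_append, List.find?_append, List.find?_append,
      pv_find?_filterMap_if, pv_find?_filterMap_if, pv_find?_map_if, pv_find?_eq_findSome?]
    cases h1 : pvCountrySuffixes.findSome? (fun suffix =>
        if PySem.Str.endswith bank_id suffix then
          (if existing_ids.contains (pvStrip bank_id suffix) then some (pvStrip bank_id suffix) else none)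
        else none) with
    | some r => rfl
    | none =>
      cases h2 : pvSuffixes.findSome? (fun suffix =>
          if PySem.Str.endswith bank_id suffix then
            (if existing_ids.contains (pvStrip bank_id suffix) then some (pvStrip bank_id suffix) else none)
          else none) with
      | some r => rfl
      | none =>
        cases h3 : pvSuffixes.findSome? (fun suffix =>
            if existing_ids.contains (bank_id ++ suffix) then some (bank_id ++ suffix) else none) with
        | some r => rfl
        | none =>
          cases h4 : ([PySem.Str.replace bank_id "-and-" "-",
                  PySem.Str.replace bank_id "-" "",
                  PySem.Str.replace bank_id "bank-of-" "",
                  PySem.Str.replace bank_id "-bank" ""]).findSome? (fun var =>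
              if existing_ids.contains var then some var else none) with
          | some r => rfl
          | none => rfl

-- ---- the rank dict looks up the first-occurrence index ----

theorem pv_rank_fold_get (l : List String) (s : Int) (d : PySem.Dict String Int) (c : String) :
    ((PySem.List.enumerate l s).foldl
        (fun d p => if d.contains p.2 then d else d.insert p.2 p.1) d).get? c
      = if d.contains c then d.get? c
        else (PySem.List.index? l c).map (fun k => s + (k : Int)) := by
  induction l generalizing s d with
  | nil =>
    rw [PySem.List.enumerate_nil]
    simp only [List.foldl_nil]
    by_cases hc : d.contains c = true
    · rw [if_pos hc]
    · have hnone : d.get? c = none := by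
        have h1 := PySem.Dict.contains_eq_isSome_get? d c
        rw [(by simpa using hc : d.contains c = false)] at h1
        exact Option.not_isSome_iff_eq_none.mp (by simp [← h1])
      simp [hnone, PySem.List.index?_eq_idxOf?, hc]
  | cons x xs ih =>
    rw [PySem.List.enumerate_cons, List.foldl_cons, ih]
    by_cases hcx : c = x
    · subst hcx
      by_cases hd : d.contains c = true
      · simp only [if_pos hd]
      · simp only [if_neg hd]
        rw [if_pos (PySem.Dict.contains_insert_self d c s),
            PySem.Dict.get?_insert_self, PySem.List.index?_cons_self]
        simp
    · have hxc : x ≠ c := fun h => hcx h.symm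
      by_cases hd : d.contains x = true
      · simp only [if_pos hd]
        rw [PySem.List.index?_cons_of_ne _ hxc]
        by_cases hdc : d.contains c = true
        · simp [hdc]
        · simp only [if_neg hdc]
          cases hix : PySem.List.index? xs c with
          | none => simp
          | some k => simp; omega
      · simp only [if_neg hd]
        rw [PySem.Dict.contains_insert, PySem.Dict.get?_insert_of_ne _ _ hcx,
            PySem.List.index?_cons_of_ne _ hxc]
        have hbe : (c == x) = false := by simpa using hcx
        rw [hbe, Bool.false_or]
        by_cases hdc : d.contains c = true
        · simp [hdc]
        · simp only [if_neg hdc]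
          cases hix : PySem.List.index? xs c with
          | none => simp
          | some k => simp; omega

theorem pvRank_get (bank_id : String) (c : String) :
    (pvRank bank_id).get? c
      = (PySem.List.index? (pvCandidates bank_id) c).map (fun k => (k : Int)) := by
  rw [pvRank, pv_rank_fold_get]
  simp [PySem.Dict.contains_empty]

-- ---- the min-rank scan ----

-- the scan step, with the rank lookup replaced by the first-occurrence index
def pvStep (cands : List String) (best : Option (Int × String)) (pid : String) :
    Option (Int × String) :=
  match (PySem.List.index? cands pid).map (fun k => (k : Int)) with
  | none => best
  | some r =>
    match best with
    | none => some (r, pid)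
    | some b => if r < b.1 then some (r, pid) else some b

-- invariant of the scan: the accumulator is a member of the seen ids whose
-- first-occurrence index in cands is minimal among all seen ids
def pvGood (cands ids : List String) (acc : Option (Int × String)) : Prop :=
  match acc with
  | none => ∀ q ∈ ids, PySem.List.index? cands q = none
  | some (r, p) => ∃ k : Nat, r = (k : Int) ∧ PySem.List.index? cands p = some k ∧ p ∈ ids ∧
      ∀ q ∈ ids, ∀ j, PySem.List.index? cands q = some j → k ≤ j

theorem pvStep_good (cands seen : List String) (acc : Option (Int × String)) (pid : String)
    (h : pvGood cands seen acc) : pvGood cands (seen ++ [pid]) (pvStep cands acc pid) := by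
  unfold pvStep
  cases hidx : PySem.List.index? cands pid with
  | none =>
    cases acc with
    | none =>
      intro q hq
      rcases List.mem_append.mp hq with hq | hq
      · exact h q hq
      · simp at hq; subst hq; exact hidx
    | some b =>
      obtain ⟨r, p⟩ := b
      obtain ⟨k, hk, hip, hps, hmin⟩ := h
      exact ⟨k, hk, hip, List.mem_append.mpr (Or.inl hps), fun q hq j hj => by
        rcases List.mem_append.mp hq with hq | hq
        · exact hmin q hq j hj
        · simp at hq; subst hq; rw [hidx] at hj; cases hj⟩
  | some k0 =>
    cases acc with
    | none =>
      exact ⟨k0, rfl, hidx, List.mem_append.mpr (Or.inr (by simp)), fun q hq j hj => by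
        rcases List.mem_append.mp hq with hq | hq
        · rw [h q hq] at hj; cases hj
        · simp at hq; subst hq; rw [hidx] at hj
          cases hj; exact le_refl _⟩
    | some b =>
      obtain ⟨r, p⟩ := b
      obtain ⟨kb, hkb, hip, hps, hmin⟩ := h
      subst hkb
      show pvGood cands (seen ++ [pid])
        (if (k0 : Int) < (kb : Int) then some (((k0 : Nat) : Int), pid) else some (((kb : Nat) : Int), p))
      by_cases hlt : (k0 : Int) < (kb : Int)
      · rw [if_pos hlt]
        have hlt' : k0 < kb := by exact_mod_cast hlt
        exact ⟨k0, rfl, hidx, List.mem_append.mpr (Or.inr (by simp)), fun q hq j hj => by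
          rcases List.mem_append.mp hq with hq | hq
          · exact le_trans (le_of_lt hlt') (hmin q hq j hj)
          · simp at hq; subst hq; rw [hidx] at hj; cases hj; exact le_refl _⟩
      · rw [if_neg hlt]
        have hle : kb ≤ k0 := by exact_mod_cast not_lt.mp hlt
        exact ⟨kb, rfl, hip, List.mem_append.mpr (Or.inl hps), fun q hq j hj => by
          rcases List.mem_append.mp hq with hq | hq
          · exact hmin q hq j hj
          · simp at hq; subst hq; rw [hidx] at hj; cases hj; exact hle⟩

theorem pvFold_good (cands : List String) :
    ∀ (ids seen : List String) (acc : Option (Int × String)),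
      pvGood cands seen acc → pvGood cands (seen ++ ids) (ids.foldl (pvStep cands) acc) := by
  intro ids
  induction ids with
  | nil => intro seen acc h; simpa using h
  | cons pid ids ih =>
    intro seen acc h
    have h1 := pvStep_good cands seen acc pid h
    have h2 := ih (seen ++ [pid]) _ h1
    simpa [List.append_assoc] using h2

-- find? returns the element at index k when the predicate holds at k and fails before
theorem pv_find?_of_first {a : Type} (pred : a → Bool) :
    ∀ (xs : List a) (k : Nat) (hk : k < xs.length),
      pred xs[k] = true → (∀ i (hi : i < k), pred (xs[i]'(by omega)) = false) →
      xs.find? pred = some xs[k] := by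
  intro xs
  induction xs with
  | nil => intro k hk; simp at hk
  | cons x t ih =>
    intro k hk hp hfail
    cases k with
    | zero => simpa using List.find?_cons_of_pos (l := t) (by simpa using hp)
    | succ k' =>
      have hx : pred x = false := hfail 0 (Nat.succ_pos _)
      rw [List.find?_cons_of_neg (l := t) (by simp [hx])]
      have := ih k' (by simpa using hk) (by simpa using hp)
        (fun i hi => by simpa using hfail (i + 1) (by omega))
      simpa using this

-- ===== VERDICT helper: B's scan equals the first candidate in existing_ids =====
theorem pvB_eq_find? (bank_id : String) (existing_ids : List String) :
    find_matching_provider_alt bank_id existing_ids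
      = (pvCandidates bank_id).find? (fun c => existing_ids.contains c) := by
  unfold find_matching_provider_alt
  have hstep : (fun (best : Option (Int × String)) (pid : String) =>
      match (pvRank bank_id).get? pid with
      | none => best
      | some r =>
        match best with
        | none => some (r, pid)
        | some b => if r < b.1 then some (r, pid) else some b)
      = pvStep (pvCandidates bank_id) := by
    funext best pid
    rw [pvStep, pvRank_get]
  simp only [hstep]
  have hgood := pvFold_good (pvCandidates bank_id) existing_ids [] none
    (by intro q hq; cases hq)
  simp only [List.nil_append] at hgood
  cases hfold : existing_ids.foldl (pvStep (pvCandidates bank_id)) none with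
  | none =>
    rw [hfold] at hgood
    simp only [Option.map_none]
    symm
    rw [List.find?_eq_none]
    intro c hc hcon
    have hmem : c ∈ existing_ids := by simpa using hcon
    have := hgood c hmem
    rw [PySem.List.index?_eq_none_iff] at this
    exact this hc
  | some b =>
    obtain ⟨r, p⟩ := b
    rw [hfold] at hgood
    obtain ⟨k, hk, hip, hps, hmin⟩ := hgood
    obtain ⟨hklen, hgetk, hfirst⟩ := PySem.List.getElem_of_index?_eq_some hip
    simp only [Option.map_some]
    symm
    have hfind := pv_find?_of_first (fun c => existing_ids.contains c)
      (pvCandidates bank_id) k hklen (by simpa [hgetk] using hps)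
      (by
        intro i hi
        by_contra hcon
        have hcon' : existing_ids.contains ((pvCandidates bank_id)[i]'(by omega)) = true := by
          simpa using hcon
        set q := (pvCandidates bank_id)[i]'(by omega) with hq
        have hqmem : q ∈ existing_ids := by simpa using hcon'
        have hqc : q ∈ pvCandidates bank_id := List.getElem_mem _
        have hsome : (PySem.List.index? (pvCandidates bank_id) q).isSome := by
          rw [PySem.List.index?_isSome_iff]; exact hqc
        obtain ⟨j, hj⟩ := Option.isSome_iff_exists.mp hsome
        obtain ⟨hjlen, hgetj, hfirstj⟩ := PySem.List.getElem_of_index?_eq_some hj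
        have hji : j ≤ i := by
          by_contra hji
          exact hfirstj i (by omega) hq.symm
        have := hmin q hqmem j hj
        omega)
    rw [hfind, hgetk]
  
-- ===== VERDICT (by name: the statement is the Claim_ definition above) =====
theorem find_matching_provider_spec : Claim_equal_find_matching_provider := by
  intro bank_id existing_ids _
  unfold Spec_find_matching_provider
  rw [pvA_eq_find?, pvB_eq_find?]
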